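-- pv_equiv track=rewrite | github.com/chenxy3791/leetcode | No0954-array-of-doubled-pairs.py | canReorderDoubled1
-- ===== SOURCE A (Python) =====
-- from typing import List
--
-- def canReorderDoubled1(arr: List[int]) -> bool:
--     if len(arr)%2 != 0:
--         return False
--     # First, sorting the input array
--     arr.sort()
--     # Brute-force search
--     while len(arr) > 0:
--         num = arr.pop(0)
--         pairFound = False
--         if num >= 0:
--             for j in range(0,len(arr)):
--                 if arr[j] == 2*num:
--                     arr.pop(j)
--                     pairFound = True
--                     break
--             if not pairFound:
--                 return False
--         else:
--             for j in range(0,len(arr)):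
--                 if 2*arr[j] == num:
--                     arr.pop(j)
--                     pairFound = True
--                     break
--             if not pairFound:
--                 return False
--     return True
-- ===== SOURCE B (Python) =====
-- from typing import List
-- from collections import Counter
--
-- def canReorderDoubled1(arr: List[int]) -> bool:
--     if len(arr) % 2 != 0:
--         return False
--     cnt = Counter(arr)
--     for x in sorted(cnt):
--         c = cnt[x]
--         if c == 0:
--             continue
--         if x == 0:
--             if c % 2 != 0:
--                 return False
--         elif x < 0:
--             if x % 2 != 0:
--                 return False
--             if cnt[x // 2] < c:
--                 return False
--             cnt[x // 2] -= c
--         else: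
--             if cnt[2 * x] < c:
--                 return False
--             cnt[2 * x] -= c
--     return True
-- ===== Notes on version B (the rewrite author's own statement) =====
-- stated objective: alternative
-- what changed: A repeatedly pops the minimum from the sorted list and linearly scans the remainder for its partner; B builds a Counter once and makes a single greedy pass over the sorted distinct keys, matching each key's whole count against the count of its double (or half, for negatives) in bulk. B does not mutate the argument, while A sorts and empties it in place (return values proved equal).
import Mathlib
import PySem

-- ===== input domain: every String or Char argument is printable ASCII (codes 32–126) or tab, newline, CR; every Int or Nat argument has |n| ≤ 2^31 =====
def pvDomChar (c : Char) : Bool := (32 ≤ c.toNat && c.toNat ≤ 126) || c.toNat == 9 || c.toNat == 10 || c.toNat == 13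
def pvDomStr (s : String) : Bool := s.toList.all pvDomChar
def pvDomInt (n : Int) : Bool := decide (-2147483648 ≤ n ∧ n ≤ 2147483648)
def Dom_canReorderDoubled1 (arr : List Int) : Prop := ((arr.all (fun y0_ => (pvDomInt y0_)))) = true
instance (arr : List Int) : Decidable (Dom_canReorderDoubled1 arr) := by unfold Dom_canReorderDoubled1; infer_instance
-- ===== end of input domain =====

-- B replaces A's pop-and-scan greedy by a Counter processed once over the sorted distinct
-- keys, matching each key's whole count in bulk; A sorts and empties its argument in place,
-- B does not mutate it — the equivalence proved here is about the RETURN value only.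

-- ===== PORT A =====
-- inner 'for j in range(0, len(arr)): if <cond>: arr.pop(j); break' — first index satisfying p
def aFindIdx (p : Int → Bool) : List Int → Option Nat
  | [] => none
  | y :: t => if p y then some 0 else (aFindIdx p t).map (· + 1)

-- the 'while len(arr) > 0' loop of A, running on the already-sorted list
def aLoop (l : List Int) : Bool :=
  match l with
  | [] => true
  | num :: rest =>
    if num ≥ 0 then
      match aFindIdx (fun y => y == 2 * num) rest with
      | some j => aLoop (rest.eraseIdx j)
      | none => false
    else
      match aFindIdx (fun y => 2 * y == num) rest with
      | some j => aLoop (rest.eraseIdx j)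
      | none => false
termination_by l.length
decreasing_by
  · exact Nat.lt_succ_of_le (List.length_eraseIdx_le _ _)
  · exact Nat.lt_succ_of_le (List.length_eraseIdx_le _ _)

def canReorderDoubled1 (arr : List Int) : Bool :=
  if arr.length % 2 ≠ 0 then false
  else aLoop (PySem.List.sorted arr (fun x => x) false)

-- ===== PORT B =====
-- the 'for x in sorted(cnt)' loop of B, over the sorted key list with the counter as state
def bLoop : List Int → PySem.Dict Int Int → Bool
  | [], _ => true
  | x :: ks, cnt =>
    let c := cnt.getD x 0
    if c == 0 then bLoop ks cnt
    else if x == 0 then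
      if PySem.Int.mod c 2 != 0 then false else bLoop ks cnt
    else if x < 0 then
      if PySem.Int.mod x 2 != 0 then false
      else if cnt.getD (PySem.Int.floordiv x 2) 0 < c then false
      else bLoop ks (cnt.insert (PySem.Int.floordiv x 2) (cnt.getD (PySem.Int.floordiv x 2) 0 - c))
    else
      if cnt.getD (2 * x) 0 < c then false
      else bLoop ks (cnt.insert (2 * x) (cnt.getD (2 * x) 0 - c))

def canReorderDoubled1_alt (arr : List Int) : Bool :=
  if arr.length % 2 ≠ 0 then false
  else
    let cnt := PySem.Dict.counter arr
    bLoop (PySem.List.sorted cnt.keys (fun x => x) false) cnt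

-- ===== PRECONDITION & SPEC =====
def Spec_canReorderDoubled1 (arr : List Int) (out : Bool) : Prop := out = canReorderDoubled1_alt arr
instance (arr : List Int) (out : Bool) : Decidable (Spec_canReorderDoubled1 arr out) := by unfold Spec_canReorderDoubled1; infer_instance

-- ===== CLAIM (what is proved, stated in full; the proofs are below) =====
def Claim_equal_canReorderDoubled1 : Prop := ∀ (arr : List Int), Dom_canReorderDoubled1 arr → Spec_canReorderDoubled1 arr (canReorderDoubled1 arr)

-- ===== LEMMAS AND PROOFS =====

-- pure model of bLoop: the counter as a plain function Int → Int
def bRun : List Int → (Int → Int) → Bool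
  | [], _ => true
  | x :: ks, F =>
    if F x = 0 then bRun ks F
    else if x = 0 then
      if PySem.Int.mod (F x) 2 ≠ 0 then false else bRun ks F
    else if x < 0 then
      if PySem.Int.mod x 2 ≠ 0 then false
      else if F (PySem.Int.floordiv x 2) < F x then false
      else bRun ks (Function.update F (PySem.Int.floordiv x 2) (F (PySem.Int.floordiv x 2) - F x))
    else
      if F (2 * x) < F x then false
      else bRun ks (Function.update F (2 * x) (F (2 * x) - F x))

def countF (s : List Int) : Int → Int := fun k => (s.count k : Int)

theorem bLoop_eq_bRun (ks : List Int) (cnt : PySem.Dict Int Int) :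
    bLoop ks cnt = bRun ks (fun k => cnt.getD k 0) := by
  induction ks generalizing cnt with
  | nil => rfl
  | cons x ks ih =>
    simp only [bLoop, bRun, beq_iff_eq, bne_iff_ne]
    split_ifs with h1 h2 h3 h4 h5 h6 h7 <;>
      first
      | rfl
      | exact ih cnt
      | (rw [ih]; congr 1; funext q;
         simp [PySem.Dict.getD_insert, Function.update_apply])

-- keys whose counts a bRun over ks can ever read
def bReads (ks : List Int) (q : Int) : Prop :=
  q ∈ ks ∨ ∃ k ∈ ks, (k < 0 ∧ q = PySem.Int.floordiv k 2) ∨ (0 < k ∧ q = 2 * k)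

theorem bReads_cons (x : Int) (ks : List Int) (q : Int) (h : bReads ks q) :
    bReads (x :: ks) q := by
  rcases h with h | ⟨k, hk, hkk⟩
  · exact Or.inl (List.mem_cons_of_mem _ h)
  · exact Or.inr ⟨k, List.mem_cons_of_mem _ hk, hkk⟩

theorem bRun_congr (ks : List Int) (F G : Int → Int)
    (h : ∀ q, bReads ks q → F q = G q) : bRun ks F = bRun ks G := by
  induction ks generalizing F G with
  | nil => rfl
  | cons x ks ih =>
    have hx : F x = G x := h x (Or.inl List.mem_cons_self)
    have hks : ∀ q, bReads ks q → F q = G q := fun q hq => h q (bReads_cons x ks q hq)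
    rcases lt_trichotomy x 0 with hs | hs | hs
    · have hp : F (PySem.Int.floordiv x 2) = G (PySem.Int.floordiv x 2) :=
        h _ (Or.inr ⟨x, List.mem_cons_self, Or.inl ⟨hs, rfl⟩⟩)
      simp only [bRun, hx, hp]
      split_ifs <;>
        first
        | rfl
        | (exfalso; omega)
        | exact ih _ _ hks
        | (apply ih; intro q hq;
           by_cases hqp : q = PySem.Int.floordiv x 2 <;>
             simp [Function.update_apply, hqp, hks q hq])
    · subst hs
      simp only [bRun, hx]
      split_ifs <;> first | rfl | exact ih _ _ hks
    · have hp : F (2 * x) = G (2 * x) :=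
        h _ (Or.inr ⟨x, List.mem_cons_self, Or.inr ⟨hs, rfl⟩⟩)
      simp only [bRun, hx, hp]
      split_ifs <;>
        first
        | rfl
        | (exfalso; omega)
        | exact ih _ _ hks
        | (apply ih; intro q hq;
           by_cases hqp : q = 2 * x <;>
             simp [Function.update_apply, hqp, hks q hq])

theorem bRun_skip (ks : List Int) (p : Int) (F : Int → Int)
    (hp : p ∈ ks) (h0 : F p = 0)
    (hw : ∀ k ∈ ks, k ≠ p → (0 < k → 2 * k ≠ p) ∧ (k < 0 → 2 ∣ k → PySem.Int.floordiv k 2 ≠ p)) :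
    bRun ks F = bRun (ks.erase p) F := by
  induction ks generalizing F with
  | nil => cases hp
  | cons k ks ih =>
    by_cases hkp : k = p
    · subst hkp
      rw [List.erase_cons_head]
      simp [bRun, h0]
    · rw [List.erase_cons_tail (by simpa using hkp)]
      have hp' : p ∈ ks := by
        rcases List.mem_cons.1 hp with h | h
        · exact absurd h.symm hkp
        · exact h
      have hw' : ∀ k' ∈ ks, k' ≠ p →
          (0 < k' → 2 * k' ≠ p) ∧ (k' < 0 → 2 ∣ k' → PySem.Int.floordiv k' 2 ≠ p) :=
        fun k' hk' => hw k' (List.mem_cons_of_mem _ hk')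
      have hwk := hw k List.mem_cons_self hkp
      rcases lt_trichotomy k 0 with hk | hk | hk
      · simp only [bRun, if_neg (show ¬k = 0 by omega), if_pos hk]
        by_cases h1 : F k = 0
        · simp only [if_pos h1]; exact ih _ hp' h0 hw'
        · simp only [if_neg h1]
          by_cases h5 : PySem.Int.mod k 2 ≠ 0
          · rw [if_pos h5, if_pos h5]
          · simp only [if_neg h5]
            by_cases h6 : F (PySem.Int.floordiv k 2) < F k
            · rw [if_pos h6, if_pos h6]
            · simp only [if_neg h6]
              have hdvd : 2 ∣ k := (PySem.Int.mod_eq_zero_iff_dvd k 2).1 (by omega)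
              have hne : p ≠ PySem.Int.floordiv k 2 := fun hh => hwk.2 hk hdvd hh.symm
              exact ih _ hp' (by rw [Function.update_apply, if_neg hne]; exact h0) hw'
      · subst hk
        simp only [bRun]
        split_ifs <;> first | rfl | exact ih _ hp' h0 hw'
      · simp only [bRun, if_neg (show ¬k = 0 by omega), if_neg (show ¬k < 0 by omega)]
        by_cases h1 : F k = 0
        · simp only [if_pos h1]; exact ih _ hp' h0 hw'
        · simp only [if_neg h1]
          by_cases h6 : F (2 * k) < F k
          · rw [if_pos h6, if_pos h6]
          · simp only [if_neg h6]
            have hne : p ≠ 2 * k := fun hh => hwk.1 hk hh.symm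
            exact ih _ hp' (by rw [Function.update_apply, if_neg hne]; exact h0) hw'

theorem aFindIdx_none_iff (p : Int → Bool) (t : List Int) :
    aFindIdx p t = none ↔ ∀ y ∈ t, ¬ p y := by
  induction t with
  | nil => simp [aFindIdx]
  | cons y t ih => by_cases hy : p y <;> simp [aFindIdx, hy, ih]

theorem aFindIdx_eraseIdx (v : Int) (t : List Int) :
    ∀ j, aFindIdx (fun y => y == v) t = some j → t.eraseIdx j = t.erase v := by
  induction t with
  | nil => intro j h; cases h
  | cons y t ih =>
    intro j h
    by_cases hy : y = v
    · subst hy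
      simp [aFindIdx] at h
      subst h
      simp [List.eraseIdx, List.erase_cons_head]
    · simp [aFindIdx, hy] at h
      obtain ⟨j', hj', rfl⟩ := h
      rw [List.erase_cons_tail (by simpa using hy)]
      simpa [List.eraseIdx] using ih j' hj'

theorem aMatch (v : Int) (t : List Int) :
    (match aFindIdx (fun y => y == v) t with
     | some j => aLoop (t.eraseIdx j)
     | none => false) = if v ∈ t then aLoop (t.erase v) else false := by
  cases h : aFindIdx (fun y => y == v) t with
  | none =>
    have : v ∉ t := by
      intro hv
      exact ((aFindIdx_none_iff _ t).1 h v hv) (by simp)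
    simp [this]
  | some j =>
    have hv : v ∈ t := by
      by_contra hv
      rw [(aFindIdx_none_iff _ t).2 (fun y hy => by
        simp only [beq_iff_eq]
        intro hEq
        exact hv (hEq ▸ hy))] at h
      cases h
    have hr : t.eraseIdx j = t.erase v := aFindIdx_eraseIdx v t j h
    simp [hr, hv]

-- A's one step, characterised: scan-for-index + eraseIdx = erase of the partner value
theorem aStep_pos (num : Int) (rest : List Int) (h : 0 ≤ num) :
    aLoop (num :: rest) =
      if 2 * num ∈ rest then aLoop (rest.erase (2 * num)) else false := by
  rw [aLoop, if_pos h]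
  exact aMatch (2 * num) rest

theorem aStep_neg_odd (num : Int) (rest : List Int) (h : num < 0) (ho : ¬ (2 ∣ num)) :
    aLoop (num :: rest) = false := by
  rw [aLoop, if_neg (by omega)]
  rw [(aFindIdx_none_iff _ rest).2 (fun y _ => by
    simp only [beq_iff_eq]
    intro hEq
    exact ho ⟨y, hEq.symm⟩)]

theorem aStep_neg_even (num : Int) (rest : List Int) (h : num < 0) (he : 2 ∣ num) :
    aLoop (num :: rest) =
      if PySem.Int.floordiv num 2 ∈ rest then aLoop (rest.erase (PySem.Int.floordiv num 2)) else false := by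
  rw [aLoop, if_neg (by omega)]
  have hfd : ∀ y : Int, (2 * y == num) = (y == PySem.Int.floordiv num 2) := by
    intro y
    obtain ⟨m, rfl⟩ := he
    rw [PySem.Int.floordiv_eq_ediv_of_pos (by norm_num),
      Int.mul_ediv_cancel_left m (by norm_num : (2:Int) ≠ 0), Bool.eq_iff_iff]
    simp only [beq_iff_eq]
    omega
  have : (fun y => 2 * y == num) = (fun y => y == PySem.Int.floordiv num 2) := funext hfd
  rw [this]
  exact aMatch (PySem.Int.floordiv num 2) rest

theorem bReads_gt (ks : List Int) (x : Int) (hks : ∀ k ∈ ks, x < k) :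
    ∀ q, bReads ks q → x < q := by
  intro q hq
  rcases hq with hq | ⟨k, hk, ⟨hkneg, rfl⟩ | ⟨hkpos, rfl⟩⟩
  · exact hks q hq
  · have hxk := hks k hk
    have h2 : (x + 1) * 2 ≤ k := by omega
    have := (PySem.Int.le_floordiv_iff_mul_le (by norm_num : (0:Int) < 2)).2 h2
    omega
  · have := hks k hk; omega

theorem core (n : Nat)
    (IH : ∀ s ks : List Int, s.length ≤ n → s.Pairwise (· ≤ ·) → ks.Pairwise (· < ·) →
      (∀ k, k ∈ ks ↔ k ∈ s) → aLoop s = bRun ks (countF s))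
    (x p : Int) (t ks' : List Int)
    (hxp : x < p)
    (hstep : ∀ (l : List Int) (G : Int → Int), G x ≠ 0 →
      bRun (x :: l) G = if G p < G x then false else bRun l (Function.update G p (G p - G x)))
    (hsort : (x :: t).Pairwise (· ≤ ·))
    (hlen : t.length ≤ n)
    (hks'pw : ks'.Pairwise (· < ·))
    (hks'gt : ∀ k ∈ ks', x < k)
    (hmem' : ∀ k, k ∈ ks' ↔ (k ∈ x :: t ∧ k ≠ x))
    (hW : ∀ k ∈ ks', k ≠ p → (0 < k → 2 * k ≠ p) ∧ (k < 0 → 2 ∣ k → PySem.Int.floordiv k 2 ≠ p)) :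
    (if p ∈ t then aLoop (t.erase p) else false)
      = if countF (x :: t) p < countF (x :: t) x then false
        else bRun ks' (Function.update (countF (x :: t)) p (countF (x :: t) p - countF (x :: t) x)) := by
  have hpx : p ≠ x := ne_of_gt hxp
  have hcx : (x :: t).count x = t.count x + 1 := List.count_cons_self
  have hdp : (x :: t).count p = t.count p := by
    rw [List.count_cons]
    simp [Ne.symm hpx]
  by_cases hpt : p ∈ t
  case neg =>
    have hd0 : t.count p = 0 := List.count_eq_zero.2 hpt
    rw [if_neg hpt, if_pos (by simp only [countF]; rw [hcx, hdp, hd0]; push_cast; omega)]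
  case pos =>
    have hd1 : 1 ≤ t.count p := List.count_pos_iff.2 hpt
    have hs2sort : (t.erase p).Pairwise (· ≤ ·) :=
      ((List.pairwise_cons.1 hsort).2).sublist (List.erase_sublist)
    have hs2len : (t.erase p).length ≤ n :=
      le_trans (List.erase_sublist).length_le hlen
    have h2x : (t.erase p).count x = t.count x := List.count_erase_of_ne hpx.symm
    have h2p : (t.erase p).count p = t.count p - 1 := List.count_erase_self
    have h2o : ∀ q : Int, q ≠ x → q ≠ p → (t.erase p).count q = (x :: t).count q := by
      intro q hqx hqp
      rw [List.count_erase_of_ne hqp, List.count_cons]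
      simp [Ne.symm hqx]
    have hnodup : ks'.Nodup := hks'pw.imp (fun h => ne_of_lt h)
    have hpks' : p ∈ ks' := (hmem' p).2 ⟨List.mem_cons_of_mem _ hpt, hpx⟩
    have hxt_mem : x ∈ t.erase p ↔ x ∈ t := List.mem_erase_of_ne hpx.symm
    -- the key list for the reduced multiset
    set tail : List Int := if p ∈ t.erase p then ks' else ks'.erase p with htail
    set ks₂ : List Int := if x ∈ t then x :: tail else tail with hks₂
    have htail_sub : tail ⊆ ks' := by
      rw [htail]; split_ifs
      · exact fun _ h => h
      · exact List.erase_subset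
    have htailpw : tail.Pairwise (· < ·) := by
      rw [htail]; split_ifs
      · exact hks'pw
      · exact hks'pw.sublist (List.erase_sublist)
    have htailmem : ∀ k, k ∈ tail ↔ (k ∈ ks' ∧ (k = p → p ∈ t.erase p)) := by
      intro k
      rw [htail]; split_ifs with hmem2
      · exact ⟨fun h => ⟨h, fun _ => hmem2⟩, fun h => h.1⟩
      · rw [hnodup.mem_erase_iff]
        constructor
        · rintro ⟨hne, hk⟩; exact ⟨hk, fun h => absurd h hne⟩
        · rintro ⟨hk, himp⟩; exact ⟨fun h => hmem2 (himp h), hk⟩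
    have hks₂pw : ks₂.Pairwise (· < ·) := by
      rw [hks₂]; split_ifs
      · exact List.pairwise_cons.2 ⟨fun k hk => hks'gt k (htail_sub hk), htailpw⟩
      · exact htailpw
    have hks₂mem : ∀ k, k ∈ ks₂ ↔ k ∈ t.erase p := by
      intro k
      by_cases hkx : k = x
      · subst hkx
        rw [hks₂, hxt_mem]
        split_ifs with hmemx
        · simp [hmemx]
        · constructor
          · intro h
            exact absurd (hks'gt k (htail_sub h)) (lt_irrefl k)
          · intro h; exact absurd h hmemx
      · have hkk : k ∈ ks₂ ↔ k ∈ tail := by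
          rw [hks₂]; split_ifs
          · simp [hkx]
          · exact Iff.rfl
        rw [hkk, htailmem k]
        have hkks' : k ∈ ks' ↔ k ∈ t := by
          rw [hmem' k]
          constructor
          · rintro ⟨hk, -⟩
            rcases List.mem_cons.1 hk with h | h
            · exact absurd h hkx
            · exact h
          · intro h; exact ⟨List.mem_cons_of_mem _ h, hkx⟩
        by_cases hkp : k = p
        · subst hkp
          simp [hpt, hkks']
        · rw [List.mem_erase_of_ne hkp]
          simp [hkks', hkp]
    have hIH := IH (t.erase p) ks₂ hs2len hs2sort hks₂pw hks₂mem
    rw [if_pos hpt, hIH]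
    simp only [countF]
    by_cases hdc : ((x :: t).count p : Int) < ((x :: t).count x : Int)
    case pos =>
      rw [if_pos hdc]
      by_cases hxt : x ∈ t
      case pos =>
        have hcnt1 : 1 ≤ t.count x := List.count_pos_iff.2 hxt
        have hFx2 : (countF (t.erase p)) x ≠ 0 := by
          simp only [countF]; rw [h2x]; exact Int.natCast_ne_zero.2 (by omega)
        rw [hks₂, if_pos hxt, hstep tail _ hFx2]
        rw [if_pos (by simp only [countF]; rw [h2x, h2p]; rw [hcx, hdp] at hdc; push_cast [Nat.cast_sub hd1] at hdc ⊢; omega)]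
      case neg =>
        exfalso
        have hcx0 : t.count x = 0 := List.count_eq_zero.2 hxt
        rw [hcx, hdp, hcx0] at hdc
        push_cast at hdc
        omega
    case neg =>
      rw [if_neg hdc]
      by_cases hxt : x ∈ t
      case pos =>
        have hcnt1 : 1 ≤ t.count x := List.count_pos_iff.2 hxt
        have hdge : t.count x + 1 ≤ t.count p := by
          rw [hcx, hdp] at hdc; push_cast at hdc; omega
        have hp2 : p ∈ t.erase p := by
          rw [← List.count_pos_iff, h2p]; omega
        have hFx2 : (countF (t.erase p)) x ≠ 0 := by
          simp only [countF]; rw [h2x]; omega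
        rw [hks₂, if_pos hxt, hstep tail _ hFx2, htail, if_pos hp2]
        rw [if_neg (by simp only [countF]; rw [h2x, h2p]; push_cast [Nat.cast_sub hd1]; omega)]
        apply bRun_congr
        intro q hq
        have hqgt : x < q := bReads_gt ks' x hks'gt q hq
        by_cases hqp : q = p
        · subst hqp
          rw [Function.update_self, Function.update_self]
          simp only [countF]
          rw [h2x, h2p, hcx, hdp]
          push_cast [Nat.cast_sub hd1]
          ring
        · rw [Function.update_of_ne hqp, Function.update_of_ne hqp]
          simp only [countF]
          exact_mod_cast h2o q (ne_of_gt hqgt) hqp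
      case neg =>
        have hcx0 : t.count x = 0 := List.count_eq_zero.2 hxt
        rw [hks₂, if_neg hxt]
        by_cases hp2 : p ∈ t.erase p
        case pos =>
          rw [htail, if_pos hp2]
          apply bRun_congr
          intro q hq
          have hqgt : x < q := bReads_gt ks' x hks'gt q hq
          by_cases hqp : q = p
          · subst hqp
            rw [Function.update_self]
            simp only [countF]
            rw [h2p, hcx, hdp, hcx0]
            push_cast [Nat.cast_sub hd1]
            ring
          · rw [Function.update_of_ne hqp]
            simp only [countF]
            exact_mod_cast h2o q (ne_of_gt hqgt) hqp
        case neg =>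
          rw [htail, if_neg hp2]
          have hdeq1 : t.count p = 1 := by
            have : (t.erase p).count p = 0 := List.count_eq_zero.2 hp2
            omega
          rw [bRun_skip ks' p _ hpks' (by rw [Function.update_self]; simp only [hcx, hdp, hcx0, hdeq1]; all_goals omega) hW]
          apply bRun_congr
          intro q hq
          have hqgt : x < q := bReads_gt (ks'.erase p) x (fun k hk => hks'gt k (List.erase_subset hk)) q hq
          by_cases hqp : q = p
          · subst hqp
            rw [Function.update_self]
            simp only [countF]
            rw [h2p, hdeq1, hcx, hdp, hcx0]
            push_cast
            omega
          · rw [Function.update_of_ne hqp]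
            simp only [countF]
            exact_mod_cast h2o q (ne_of_gt hqgt) hqp

theorem main_lemma : ∀ (n : Nat) (s ks : List Int), s.length ≤ n →
    s.Pairwise (· ≤ ·) → ks.Pairwise (· < ·) → (∀ k, k ∈ ks ↔ k ∈ s) →
    aLoop s = bRun ks (countF s) := by
  intro n
  induction n with
  | zero =>
    intro s ks hlen _ _ hmem
    have hs : s = [] := List.eq_nil_of_length_eq_zero (Nat.le_zero.1 hlen)
    subst hs
    have hks : ks = [] := List.eq_nil_iff_forall_not_mem.2 (fun a ha => by simpa using (hmem a).1 ha)
    subst hks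
    simp [aLoop, bRun]
  | succ n ih =>
    intro s ks hlen hsort hkspw hmem
    cases s with
    | nil =>
      have hks : ks = [] := List.eq_nil_iff_forall_not_mem.2 (fun a ha => by simpa using (hmem a).1 ha)
      subst hks
      simp [aLoop, bRun]
    | cons x t =>
      cases ks with
      | nil => exact absurd ((hmem x).2 List.mem_cons_self) (List.not_mem_nil)
      | cons k0 ks' =>
        have ht : ∀ y ∈ t, x ≤ y := (List.pairwise_cons.1 hsort).1
        have hk0x : k0 = x := by
          have hk0s : k0 ∈ x :: t := (hmem k0).1 List.mem_cons_self
          have hxks : x ∈ k0 :: ks' := (hmem x).2 List.mem_cons_self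
          have hk' := (List.pairwise_cons.1 hkspw).1
          rcases List.mem_cons.1 hk0s with h | h
          · exact h
          · have h1 : x ≤ k0 := ht _ h
            rcases List.mem_cons.1 hxks with h2 | h2
            · exact h2.symm
            · have := hk' _ h2; omega
        subst k0
        have hks'gt : ∀ k ∈ ks', x < k := (List.pairwise_cons.1 hkspw).1
        have hks'pw : ks'.Pairwise (· < ·) := (List.pairwise_cons.1 hkspw).2
        have hmem' : ∀ k, k ∈ ks' ↔ (k ∈ x :: t ∧ k ≠ x) := by
          intro k
          constructor
          · intro hk
            exact ⟨(hmem k).1 (List.mem_cons_of_mem _ hk), ne_of_gt (hks'gt k hk)⟩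
          · rintro ⟨hk, hne⟩
            rcases List.mem_cons.1 ((hmem k).2 hk) with h | h
            · exact absurd h hne
            · exact h
        have hlen' : t.length ≤ n := by simpa using Nat.succ_le_succ_iff.1 hlen
        have hFx : countF (x :: t) x ≠ 0 := by
          simp only [countF, List.count_cons_self]
          exact Int.natCast_ne_zero.2 (by omega)
        rcases lt_trichotomy x 0 with hx | hx | hx
        · -- x < 0
          by_cases hdvd : 2 ∣ x
          · have hmod0 : ¬ PySem.Int.mod x 2 ≠ 0 :=
              fun h => h ((PySem.Int.mod_eq_zero_iff_dvd x 2).2 hdvd)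
            have hstep : ∀ (l : List Int) (G : Int → Int), G x ≠ 0 →
                bRun (x :: l) G = if G (PySem.Int.floordiv x 2) < G x then false
                  else bRun l (Function.update G (PySem.Int.floordiv x 2)
                    (G (PySem.Int.floordiv x 2) - G x)) := by
              intro l G hG
              simp only [bRun, if_neg hG, if_neg (show ¬x = 0 by omega), if_pos hx, if_neg hmod0]
            have hxp : x < PySem.Int.floordiv x 2 := by
              have h2 : (x + 1) * 2 ≤ x := by omega
              have := (PySem.Int.le_floordiv_iff_mul_le (by norm_num : (0:Int) < 2)).2 h2
              omega
            have hplt : PySem.Int.floordiv x 2 < 0 := by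
              have := (PySem.Int.floordiv_lt_iff_lt_mul (q := 0) (by norm_num : (0:Int) < 2)).2
                (by omega : x < 0 * 2)
              exact this
            have hW : ∀ k ∈ ks', k ≠ PySem.Int.floordiv x 2 →
                (0 < k → 2 * k ≠ PySem.Int.floordiv x 2) ∧
                (k < 0 → 2 ∣ k → PySem.Int.floordiv k 2 ≠ PySem.Int.floordiv x 2) := by
              intro k hk hkne
              constructor
              · intro hkpos heq; omega
              · intro hkneg hk2 heq
                obtain ⟨m, rfl⟩ := hk2
                obtain ⟨m', hm'⟩ := hdvd
                rw [PySem.Int.floordiv_eq_ediv_of_pos (by norm_num),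
                  Int.mul_ediv_cancel_left m (by norm_num : (2:Int) ≠ 0)] at heq
                have hx2 : PySem.Int.floordiv x 2 = m' := by
                  rw [hm', PySem.Int.floordiv_eq_ediv_of_pos (by norm_num),
                    Int.mul_ediv_cancel_left m' (by norm_num : (2:Int) ≠ 0)]
                have := hks'gt _ hk
                omega
            rw [aStep_neg_even x t hx hdvd, hstep ks' (countF (x :: t)) hFx]
            exact core n ih x (PySem.Int.floordiv x 2) t ks' hxp hstep hsort hlen' hks'pw hks'gt hmem' hW
          · have hmodne : PySem.Int.mod x 2 ≠ 0 :=
              fun h => hdvd ((PySem.Int.mod_eq_zero_iff_dvd x 2).1 h)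
            rw [aStep_neg_odd x t hx hdvd]
            simp only [bRun, if_neg hFx, if_neg (show ¬x = 0 by omega), if_pos hx, if_pos hmodne]
        · -- x = 0
          subst hx
          rw [aStep_pos 0 t le_rfl]
          simp only [bRun, if_neg hFx, mul_zero]
          have hkspos : ∀ k ∈ ks', (0:Int) < k := hks'gt
          have hcongr0 : ∀ G H : Int → Int, (∀ q, q ≠ 0 → G q = H q) →
              bRun ks' G = bRun ks' H := by
            intro G H h
            exact bRun_congr ks' G H (fun q hq =>
              h q (ne_of_gt (bReads_gt ks' 0 hkspos q hq)))
          by_cases h0t : (0 : Int) ∈ t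
          · have hc1 : 1 ≤ t.count 0 := List.count_pos_iff.2 h0t
            have hs2sort : (t.erase 0).Pairwise (· ≤ ·) :=
              ((List.pairwise_cons.1 hsort).2).sublist List.erase_sublist
            have hs2len : (t.erase 0).length ≤ n :=
              le_trans (List.erase_sublist).length_le hlen'
            have h20 : (t.erase 0).count 0 = t.count 0 - 1 := List.count_erase_self
            have h2o : ∀ q : Int, q ≠ 0 → (t.erase 0).count q = (0 :: t).count q := by
              intro q hq
              rw [List.count_erase_of_ne hq, List.count_cons]
              simp [Ne.symm hq]
            set ks₂ : List Int := if (0:Int) ∈ t.erase 0 then 0 :: ks' else ks' with hks₂def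
            have hks₂pw : ks₂.Pairwise (· < ·) := by
              rw [hks₂def]; split_ifs
              · exact List.pairwise_cons.2 ⟨hkspos, hks'pw⟩
              · exact hks'pw
            have hks₂mem : ∀ k, k ∈ ks₂ ↔ k ∈ t.erase 0 := by
              intro k
              by_cases hk0 : k = 0
              · subst hk0
                rw [hks₂def]
                split_ifs with hmem0
                · simp [hmem0]
                · simp only [iff_false_intro hmem0, iff_false]
                  intro hk
                  exact absurd (hkspos 0 hk) (lt_irrefl 0)
              · have : k ∈ ks₂ ↔ k ∈ ks' := by
                  rw [hks₂def]; split_ifs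
                  · simp [hk0]
                  · exact Iff.rfl
                rw [this, hmem' k, List.mem_erase_of_ne hk0]
                constructor
                · rintro ⟨hk, -⟩
                  rcases List.mem_cons.1 hk with h | h
                  · exact absurd h hk0
                  · exact h
                · intro h; exact ⟨List.mem_cons_of_mem _ h, hk0⟩
            have hIH := ih (t.erase 0) ks₂ hs2len hs2sort hks₂pw hks₂mem
            rw [if_pos h0t, hIH]
            have hcnt : countF (0 :: t) 0 = (t.count 0 : Int) + 1 := by
              simp only [countF, List.count_cons_self]; push_cast; ring
            by_cases hpar : PySem.Int.mod (countF (0 :: t) 0) 2 ≠ 0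
            · rw [if_pos hpar]
              have hodd : ¬ (2 ∣ ((t.count 0 : Int) + 1)) := by
                rw [← hcnt]
                exact fun h => hpar ((PySem.Int.mod_eq_zero_iff_dvd _ 2).2 h)
              have h0t2 : (0:Int) ∈ t.erase 0 := by
                rw [← List.count_pos_iff, h20]
                omega
              rw [hks₂def, if_pos h0t2]
              have hF20 : countF (t.erase 0) 0 ≠ 0 := by
                simp only [countF]
                have : 1 ≤ (t.erase 0).count 0 := List.count_pos_iff.2 h0t2
                exact Int.natCast_ne_zero.2 (by omega)
              simp only [bRun, if_neg hF20]
              have hpar2 : PySem.Int.mod (countF (t.erase 0) 0) 2 ≠ 0 := by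
                intro h
                have h2 : 2 ∣ (((t.erase 0).count 0 : Int)) :=
                  (PySem.Int.mod_eq_zero_iff_dvd _ 2).1 (by simpa [countF] using h)
                rw [h20] at h2
                push_cast [Nat.cast_sub hc1] at h2
                omega
              rw [if_pos hpar2]
              simp
            · rw [if_neg hpar]
              have heven : 2 ∣ ((t.count 0 : Int) + 1) := by
                rw [← hcnt]
                exact (PySem.Int.mod_eq_zero_iff_dvd _ 2).1 (by omega)
              by_cases h0t2 : (0:Int) ∈ t.erase 0
              · rw [hks₂def, if_pos h0t2]
                have hF20 : countF (t.erase 0) 0 ≠ 0 := by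
                  simp only [countF]
                  have : 1 ≤ (t.erase 0).count 0 := List.count_pos_iff.2 h0t2
                  exact Int.natCast_ne_zero.2 (by omega)
                simp only [bRun, if_neg hF20]
                have hpar2 : ¬ PySem.Int.mod (countF (t.erase 0) 0) 2 ≠ 0 := by
                  intro hcon
                  have h2 : ¬ (2 ∣ (((t.erase 0).count 0 : Int))) :=
                    fun h => hcon (by simpa [countF] using (PySem.Int.mod_eq_zero_iff_dvd (((t.erase 0).count 0 : Int)) 2).2 h)
                  rw [h20] at h2
                  push_cast [Nat.cast_sub hc1] at h2
                  omega
                rw [if_neg hpar2]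
                apply hcongr0
                intro q hq
                simp only [countF]
                exact_mod_cast h2o q hq
              · rw [hks₂def, if_neg h0t2]
                apply hcongr0
                intro q hq
                simp only [countF]
                exact_mod_cast h2o q hq
          · rw [if_neg h0t]
            have hc0 : t.count 0 = 0 := List.count_eq_zero.2 h0t
            have hcnt : countF (0 :: t) 0 = 1 := by
              simp [countF, hc0]
            have hpar : PySem.Int.mod (countF (0 :: t) 0) 2 ≠ 0 := by
              rw [hcnt]; all_goals decide
            rw [if_pos hpar]
            simp
        · -- x > 0
          have hstep : ∀ (l : List Int) (G : Int → Int), G x ≠ 0 →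
              bRun (x :: l) G = if G (2 * x) < G x then false
                else bRun l (Function.update G (2 * x) (G (2 * x) - G x)) := by
            intro l G hG
            simp only [bRun, if_neg hG, if_neg (show ¬x = 0 by omega),
              if_neg (show ¬x < 0 by omega)]
          have hW : ∀ k ∈ ks', k ≠ 2 * x →
              (0 < k → 2 * k ≠ 2 * x) ∧ (k < 0 → 2 ∣ k → PySem.Int.floordiv k 2 ≠ 2 * x) := by
            intro k hk hkne
            have := hks'gt k hk
            constructor
            · intro _ heq; omega
            · intro hkneg _ _; omega
          rw [aStep_pos x t (by omega), hstep ks' (countF (x :: t)) hFx]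
          exact core n ih x (2 * x) t ks' (by omega) hstep hsort hlen' hks'pw hks'gt hmem' hW

-- ===== VERDICT (by name: the statement is the Claim_ definition above) =====
theorem canReorderDoubled1_spec : Claim_equal_canReorderDoubled1 := by
  intro arr _
  unfold Spec_canReorderDoubled1 canReorderDoubled1 canReorderDoubled1_alt
  by_cases hpar : arr.length % 2 ≠ 0
  · rw [if_pos hpar, if_pos hpar]
  · rw [if_neg hpar, if_neg hpar]
    rw [bLoop_eq_bRun]
    have hsort : (PySem.List.sorted arr (fun x => x) false).Pairwise (· ≤ ·) :=
      PySem.List.sorted_pairwise arr (fun x => x)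
    have hkpw : (PySem.List.sorted (PySem.Dict.counter arr).keys (fun x => x) false).Pairwise (· < ·) := by
      rw [PySem.Dict.keys_counter]
      exact PySem.List.sorted_ofList_pairwise_lt arr
    have hmem : ∀ k, k ∈ PySem.List.sorted (PySem.Dict.counter arr).keys (fun x => x) false ↔
        k ∈ PySem.List.sorted arr (fun x => x) false := by
      intro k
      rw [PySem.List.mem_sorted, PySem.List.mem_sorted, PySem.Dict.keys_counter,
        PySem.Set.mem_ofList]
    have hcnt : (fun k => (PySem.Dict.counter arr).getD k 0) =
        countF (PySem.List.sorted arr (fun x => x) false) := by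
      funext k
      rw [PySem.Dict.getD_counter]
      simp only [countF]
      exact_mod_cast (((PySem.List.sorted_perm arr (fun x => x) false).count_eq k).symm)
    rw [hcnt]
    exact main_lemma (PySem.List.sorted arr (fun x => x) false).length _ _ le_rfl hsort hkpw hmem
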